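-- pv_equiv track=rewrite | github.com/rolewj/steganography | lab5/rs_analysis.py | create_masks
-- ===== SOURCE A (Python) =====
-- def create_masks(m: int, n: int) -> list[list[int]]:
--     mask_pos = []
--     mask_neg = []
--     for i in range(n):
--         for j in range(m):
--             if ((j % 2 == 0 and i % 2 == 0) or (j % 2 == 1 and i % 2 == 1)):
--                 mask_pos.append(1)
--                 mask_neg.append(0)
--             else:
--                 mask_pos.append(0)
--                 mask_neg.append(1)
--     return [mask_pos, mask_neg]
-- ===== SOURCE B (Python) =====
-- def create_masks(m: int, n: int) -> list[list[int]]: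
--     mask_pos = []
--     mask_neg = []
--     if n > 0:
--         even_row = [1 if j % 2 == 0 else 0 for j in range(m)]
--         odd_row = [1 - v for v in even_row]
--         for i in range(n):
--             if i % 2 == 0:
--                 mask_pos.extend(even_row)
--                 mask_neg.extend(odd_row)
--             else:
--                 mask_pos.extend(odd_row)
--                 mask_neg.extend(even_row)
--     return [mask_pos, mask_neg]
-- ===== Notes on version B (the rewrite author's own statement) =====
-- stated objective: alternative
-- what changed: B precomputes the two length-m row templates once and tiles them with list.extend per row (skipping template construction when n<=0), instead of testing parity and appending cell by cell in a nested loop.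
import Mathlib
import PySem

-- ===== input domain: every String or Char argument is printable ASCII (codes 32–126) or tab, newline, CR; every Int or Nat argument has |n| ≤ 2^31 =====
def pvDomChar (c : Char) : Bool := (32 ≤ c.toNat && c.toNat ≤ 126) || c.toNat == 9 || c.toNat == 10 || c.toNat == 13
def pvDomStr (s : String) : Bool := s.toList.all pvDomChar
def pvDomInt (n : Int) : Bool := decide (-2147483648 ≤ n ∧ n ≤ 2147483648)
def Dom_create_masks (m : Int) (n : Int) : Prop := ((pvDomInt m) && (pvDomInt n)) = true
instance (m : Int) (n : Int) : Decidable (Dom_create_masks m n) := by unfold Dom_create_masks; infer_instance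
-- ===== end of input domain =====

-- B precomputes the two length-m row templates once and tiles them row by row,
-- instead of testing parity and appending cell by cell in a nested loop (objective: alternative decomposition).

-- ===== PORT A =====
def create_masks (m : Int) (n : Int) : List (List Int) :=
  let r := (PySem.List.pyRange 0 n 1).foldl (fun (st : List Int × List Int) i =>
    (PySem.List.pyRange 0 m 1).foldl (fun (st : List Int × List Int) j =>
      if (PySem.Int.mod j 2 == 0 && PySem.Int.mod i 2 == 0) ||
         (PySem.Int.mod j 2 == 1 && PySem.Int.mod i 2 == 1) then
        (st.1 ++ [1], st.2 ++ [0])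
      else
        (st.1 ++ [0], st.2 ++ [1])) st) ([], [])
  [r.1, r.2]

-- ===== PORT B =====
def create_masks_alt (m : Int) (n : Int) : List (List Int) :=
  if 0 < n then
    let even_row := (PySem.List.pyRange 0 m 1).map (fun j => if PySem.Int.mod j 2 == 0 then (1 : Int) else 0)
    let odd_row := even_row.map (fun v => 1 - v)
    let r := (PySem.List.pyRange 0 n 1).foldl (fun (st : List Int × List Int) i =>
        if PySem.Int.mod i 2 == 0 then (st.1 ++ even_row, st.2 ++ odd_row)
        else (st.1 ++ odd_row, st.2 ++ even_row)) ([], [])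
    [r.1, r.2]
  else [[], []]

-- ===== PRECONDITION & SPEC =====
def Spec_create_masks (m : Int) (n : Int) (out : List (List Int)) : Prop := out = create_masks_alt m n
instance (m : Int) (n : Int) (out : List (List Int)) : Decidable (Spec_create_masks m n out) := by unfold Spec_create_masks; infer_instance

-- ===== CLAIM (what is proved, stated in full; the proofs are below) =====
def Claim_equal_create_masks : Prop := ∀ (m : Int) (n : Int), Dom_create_masks m n → Spec_create_masks m n (create_masks m n)

-- ===== LEMMAS AND PROOFS =====

-- A's inner loop over any list of column indices appends the per-cell values of row i.
theorem inner_foldl_eq (i : Int) (L : List Int) (st : List Int × List Int) :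
    L.foldl (fun (st : List Int × List Int) j =>
      if (PySem.Int.mod j 2 == 0 && PySem.Int.mod i 2 == 0) ||
         (PySem.Int.mod j 2 == 1 && PySem.Int.mod i 2 == 1) then
        (st.1 ++ [1], st.2 ++ [0])
      else
        (st.1 ++ [0], st.2 ++ [1])) st
    = (st.1 ++ L.map (fun j => if (PySem.Int.mod j 2 == 0 && PySem.Int.mod i 2 == 0) ||
                                  (PySem.Int.mod j 2 == 1 && PySem.Int.mod i 2 == 1) then (1 : Int) else 0),
       st.2 ++ L.map (fun j => if (PySem.Int.mod j 2 == 0 && PySem.Int.mod i 2 == 0) ||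
                                  (PySem.Int.mod j 2 == 1 && PySem.Int.mod i 2 == 1) then (0 : Int) else 1)) := by
  induction L generalizing st with
  | nil => simp
  | cons j t ih =>
    simp only [List.foldl_cons, List.map_cons]
    cases h : ((PySem.Int.mod j 2 == 0 && PySem.Int.mod i 2 == 0) ||
               (PySem.Int.mod j 2 == 1 && PySem.Int.mod i 2 == 1)) with
    | true => simp only [reduceIte]; rw [ih]; simp
    | false => simp only [Bool.false_eq_true, reduceIte]; rw [ih]; simp

theorem mod_two_cases (a : Int) : PySem.Int.mod a 2 = 0 ∨ PySem.Int.mod a 2 = 1 := by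
  have h1 := PySem.Int.mod_nonneg a (b := 2) (by omega)
  have h2 := PySem.Int.mod_lt a (b := 2) (by omega)
  omega

theorem create_masks_spec_aux (m n : Int) : create_masks m n = create_masks_alt m n := by
  unfold create_masks create_masks_alt
  by_cases hn : 0 < n
  case neg =>
    rw [if_neg hn, show PySem.List.pyRange 0 n 1 = [] from PySem.List.pyRange_one_eq_nil (by omega)]
    rfl
  rw [if_pos hn]
  simp only
  refine congrArg (fun (r : List Int × List Int) => [r.1, r.2]) ?_
  apply PySem.List.foldl_congr_mem
  intro st i _
  rw [inner_foldl_eq]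
  rcases mod_two_cases i with hi | hi
  · rw [if_pos (show (PySem.Int.mod i 2 == 0) = true by rw [hi]; rfl), List.map_map, Prod.mk.injEq]
    constructor <;>
    · refine congrArg _ ?_
      refine List.map_congr_left ?_
      intro j _
      try simp only [Function.comp_apply]
      rw [hi]
      rcases mod_two_cases j with hj | hj <;> rw [hj] <;> decide
  · rw [if_neg (show ¬ (PySem.Int.mod i 2 == 0) = true by rw [hi]; decide), List.map_map, Prod.mk.injEq]
    constructor <;>
    · refine congrArg _ ?_
      refine List.map_congr_left ?_
      intro j _
      try simp only [Function.comp_apply]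
      rw [hi]
      rcases mod_two_cases j with hj | hj <;> rw [hj] <;> decide

-- ===== VERDICT (by name: the statement is the Claim_ definition above) =====
theorem create_masks_spec : Claim_equal_create_masks := by
  intro m n _
  exact create_masks_spec_aux m n
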